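-- pv_equiv track=rewrite | github.com/AbramovaP/6_lab | Lab/5laba.py | generate_optimized_passwords
-- ===== SOURCE A (Python) =====
-- import string
--
-- letters = list(string.ascii_letters)
--
-- digits = list(string.digits)
--
-- letters_and_digits = letters + digits
--
-- def generate_optimized_passwords(K, T):
--     result = []
--     def backtrack(path, used, pos):
--         if len(path) == K:
--             if any(c in digits for c in path):
--                 if path[0] in string.ascii_uppercase:
--                     result.append("".join(path))
--             return
--         candidates = letters if pos < T else letters_and_digits
--         for ch in candidates:
--             if ch not in used:
--                 path.append(ch)
--                 used.add(ch)
--                 backtrack(path, used, pos + 1)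
--                 path.pop()
--                 used.remove(ch)
--
--     backtrack([], set(), 0)
--     return result
-- ===== SOURCE B (Python) =====
-- import string
-- from itertools import product
--
-- letters = list(string.ascii_letters)
-- digits = list(string.digits)
-- letters_and_digits = letters + digits
--
-- def generate_optimized_passwords(K, T):
--     pools = [letters if pos < T else letters_and_digits for pos in range(K)]
--     out = []
--     for t in product(*pools):
--         if len(set(t)) == K and any(c in digits for c in t) and t[0] in string.ascii_uppercase:
--             out.append("".join(t))
--     return out
-- ===== Notes on version B (the rewrite author's own statement) =====
-- stated objective: simpler
-- what changed: B replaces A's recursive backtracking with a mutable used-set and path by a flat enumeration of itertools.product over per-position candidate pools, filtered by len(set(t))==K, has-digit and uppercase-first; same output order.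
-- outside the precondition, e.g. on generate_optimized_passwords(-1, 0): A does not finish within the time limit, B returns []
import Mathlib
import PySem

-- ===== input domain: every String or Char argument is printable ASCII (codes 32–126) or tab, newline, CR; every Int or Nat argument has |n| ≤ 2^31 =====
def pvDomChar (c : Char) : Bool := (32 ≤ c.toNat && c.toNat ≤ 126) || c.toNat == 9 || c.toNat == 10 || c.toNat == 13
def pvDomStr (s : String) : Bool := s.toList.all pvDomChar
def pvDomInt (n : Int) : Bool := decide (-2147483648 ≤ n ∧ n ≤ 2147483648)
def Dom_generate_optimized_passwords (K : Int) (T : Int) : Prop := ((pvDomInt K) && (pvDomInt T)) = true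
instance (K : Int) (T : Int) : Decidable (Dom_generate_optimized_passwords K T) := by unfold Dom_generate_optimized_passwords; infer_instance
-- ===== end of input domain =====

-- B replaces A's recursive used-set backtracking by a flat product-then-filter enumeration (simpler decomposition, same output order).

-- ===== PORT A =====
-- string.ascii_letters, string.digits, string.ascii_uppercase as lists of chars
def pvLetters : List Char :=
  ['a','b','c','d','e','f','g','h','i','j','k','l','m','n','o','p','q','r','s','t','u','v','w','x','y','z',
   'A','B','C','D','E','F','G','H','I','J','K','L','M','N','O','P','Q','R','S','T','U','V','W','X','Y','Z']
def pvDigits : List Char := ['0','1','2','3','4','5','6','7','8','9']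
def pvUppers : List Char :=
  ['A','B','C','D','E','F','G','H','I','J','K','L','M','N','O','P','Q','R','S','T','U','V','W','X','Y','Z']

-- A's backtrack; `fuel` only makes the recursion total: the depth never exceeds 62 (= |letters_and_digits|)
-- because every recursive call adds a fresh character to `used`, so starting from fuel 63 it is never exhausted.
def pvBackA (K T : Int) : Nat → List Char → PySem.Set Char → Int → List String
  | 0, _, _, _ => []
  | fuel+1, path, used, pos =>
    if (path.length : Int) = K then
      (if path.any (fun c => pvDigits.contains c) then
        (match path with
         | c :: _ => if pvUppers.contains c then [String.ofList path] else []
         | [] => [])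
       else [])
    else
      (if pos < T then pvLetters else pvLetters ++ pvDigits).foldl
        (fun acc ch =>
          if PySem.Set.contains used ch then acc
          else acc ++ pvBackA K T fuel (path ++ [ch]) (PySem.Set.add used ch) (pos + 1)) []

def generate_optimized_passwords (K : Int) (T : Int) : List String :=
  pvBackA K T 63 [] PySem.Set.empty 0

-- ===== PORT B =====
-- per-position candidate pool
def pvPool (T : Int) (pos : Int) : List Char := if pos < T then pvLetters else pvLetters ++ pvDigits

-- itertools.product(*pools): first pool varies slowest
def pvProduct : List (List Char) → List (List Char)
  | [] => [[]]
  | p :: ps => p.flatMap (fun c => (pvProduct ps).map (fun t => c :: t))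

-- len(set(t)) == K and any(c in digits for c in t) and t[0] in ascii_uppercase
def pvCondB (K : Int) (t : List Char) : Bool :=
  (((PySem.Set.ofList t).length : Int) == K) && t.any (fun c => pvDigits.contains c) &&
    (match t with | c :: _ => pvUppers.contains c | [] => false)

def generate_optimized_passwords_alt (K : Int) (T : Int) : List String :=
  (pvProduct ((PySem.List.pyRange 0 K 1).map (pvPool T))).foldl
    (fun acc t => if pvCondB K t then acc ++ [String.ofList t] else acc) []

-- ===== PRECONDITION & SPEC =====
-- Pre_ excludes negative K, on which A's test len(path)==K can never fire, so its DFS must walk the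
-- entire tree of ~62!-many distinct-character paths before returning []: it diverges in practice,
-- while B returns [] immediately.
def Pre_generate_optimized_passwords (K : Int) (T : Int) : Prop := 0 ≤ K
instance (K : Int) (T : Int) : Decidable (Pre_generate_optimized_passwords K T) := by
  unfold Pre_generate_optimized_passwords; infer_instance
def pvWitness_generate_optimized_passwords : Int × Int := (2, 1)

def Spec_generate_optimized_passwords (K : Int) (T : Int) (out : List String) : Prop := out = generate_optimized_passwords_alt K T
instance (K : Int) (T : Int) (out : List String) : Decidable (Spec_generate_optimized_passwords K T out) := by unfold Spec_generate_optimized_passwords; infer_instance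

-- ===== CLAIM (what is proved, stated in full; the proofs are below) =====
def Claim_equal_generate_optimized_passwords : Prop := ∀ (K : Int) (T : Int), Dom_generate_optimized_passwords K T → Pre_generate_optimized_passwords K T → Spec_generate_optimized_passwords K T (generate_optimized_passwords K T)

-- ===== LEMMAS AND PROOFS =====

-- the full alphabet letters_and_digits
def pvAlpha : List Char := pvLetters ++ pvDigits

-- the leaf acceptance test on a full candidate string s (A checks distinctness via `used`, B via len(set))
def pvOk (s : List Char) : Bool :=
  decide s.Nodup && s.any (fun c => pvDigits.contains c) &&
    (match s with | c :: _ => pvUppers.contains c | [] => false)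

-- product of the pools for positions pos, pos+1, …, pos+m-1
def pvProdFrom (T : Int) : Nat → Int → List (List Char)
  | 0, _ => [[]]
  | m+1, pos => (pvPool T pos).flatMap (fun c => (pvProdFrom T m (pos+1)).map (fun t => c :: t))

-- the reference value: all accepted extensions of `path` by m more characters
def pvE (T : Int) (path : List Char) (m : Nat) (pos : Int) : List String :=
  (pvProdFrom T m pos).flatMap (fun t => if pvOk (path ++ t) then [String.ofList (path ++ t)] else [])

theorem pvOfList_append_singleton (xs : List Char) (c : Char) :
    PySem.Set.ofList (xs ++ [c]) = PySem.Set.add (PySem.Set.ofList xs) c := by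
  simp [PySem.Set.ofList_eq_foldl, List.foldl_append]

theorem pvOfList_sublist (t : List Char) : (PySem.Set.ofList t).Sublist t := by
  induction t using List.reverseRecOn with
  | nil => simp [PySem.Set.ofList_eq_foldl]
  | append_singleton xs x ih =>
    rw [pvOfList_append_singleton]
    unfold PySem.Set.add
    split
    · exact ih.trans (List.sublist_append_left xs [x])
    · exact ih.append (List.Sublist.refl [x])

theorem pvOfList_length_eq_iff (t : List Char) :
    (PySem.Set.ofList t).length = t.length ↔ t.Nodup := by
  constructor
  · intro h
    have he := (pvOfList_sublist t).eq_of_length h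
    rw [← he]
    exact PySem.Set.nodup_ofList t
  · intro h
    rw [PySem.Set.ofList_eq_self_of_nodup t h]

theorem pvE_of_not_nodup (T : Int) (path : List Char) (m : Nat) (pos : Int)
    (h : ¬ path.Nodup) : pvE T path m pos = [] := by
  unfold pvE
  refine List.flatMap_eq_nil_iff.mpr ?_
  intro t _
  have hnn : ¬ (path ++ t).Nodup := fun hn => h (hn.sublist (List.sublist_append_left path t))
  simp [pvOk, hnn]

theorem pvE_cons (T : Int) (path : List Char) (ch : Char) (m : Nat) (pos : Int) :
    (pvProdFrom T m pos).flatMap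
        (fun t => if pvOk (path ++ ch :: t) then [String.ofList (path ++ ch :: t)] else [])
      = pvE T (path ++ [ch]) m pos := by
  unfold pvE
  apply List.flatMap_congr
  intro t _
  rw [List.append_cons]

theorem pvProdFrom_length (T : Int) : ∀ (m : Nat) (p : Int) (t : List Char),
    t ∈ pvProdFrom T m p → t.length = m := by
  intro m
  induction m with
  | zero =>
    intro p t ht
    simp only [pvProdFrom, List.mem_singleton] at ht
    simp [ht]
  | succ m ih =>
    intro p t ht
    simp only [pvProdFrom, List.mem_flatMap, List.mem_map] at ht
    obtain ⟨c, _, t', ht', rfl⟩ := ht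
    simp [ih _ _ ht']

theorem pvProduct_pools (T : Int) : ∀ (m : Nat) (p : Int),
    pvProduct ((PySem.List.pyRange p (p + (m : Int)) 1).map (pvPool T)) = pvProdFrom T m p := by
  intro m
  induction m with
  | zero =>
    intro p
    rw [show p + ((0 : Nat) : Int) = p by simp, PySem.List.pyRange_one_eq_nil (le_refl p)]
    rfl
  | succ m ih =>
    intro p
    have hc : p + ((m + 1 : Nat) : Int) = (p + 1) + (m : Int) := by push_cast; ring
    rw [hc, PySem.List.pyRange_one_cons (show p < (p + 1) + (m : Int) by
      have : (0 : Int) ≤ (m : Int) := Int.natCast_nonneg m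
      omega)]
    simp only [List.map_cons]
    simp only [pvProduct, pvProdFrom]
    rw [ih (p + 1)]

theorem pvBackA_eq (K T : Int) : ∀ (fuel : Nat) (path : List Char),
    path.length + fuel = 63 → path.Nodup → (∀ c ∈ path, c ∈ pvAlpha) →
    0 ≤ K → (path.length : Int) ≤ K →
    pvBackA K T fuel path (PySem.Set.ofList path) (path.length : Int)
      = pvE T path (K - path.length).toNat (path.length : Int) := by
  intro fuel
  induction fuel with
  | zero =>
    intro path hf hnd hsub _ _
    exfalso
    have hsp : List.Subperm path pvAlpha := hnd.subperm (fun c hc => hsub c hc)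
    have hl := hsp.length_le
    have h62 : pvAlpha.length = 62 := rfl
    omega
  | succ fuel ih =>
    intro path hf hnd hsub hK hle
    by_cases hstop : (path.length : Int) = K
    · have hm : (K - (path.length : Int)).toNat = 0 := by omega
      rw [hm]
      simp only [pvBackA, if_pos hstop]
      simp only [pvE, pvProdFrom, List.flatMap_cons, List.flatMap_nil, List.append_nil]
      cases path with
      | nil => simp [pvOk]
      | cons c cs =>
        simp [pvOk, hnd]
        try (split_ifs <;> simp_all)
    · have hlt : (path.length : Int) < K := lt_of_le_of_ne hle hstop
      have hm : (K - (path.length : Int)).toNat = (K - ((path.length : Int) + 1)).toNat + 1 := by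
        omega
      simp only [pvBackA, if_neg hstop]
      have hfun : (fun (acc : List String) ch =>
            if PySem.Set.contains (PySem.Set.ofList path) ch then acc
            else acc ++ pvBackA K T fuel (path ++ [ch]) (PySem.Set.add (PySem.Set.ofList path) ch)
              ((path.length : Int) + 1))
          = (fun acc ch => acc ++ (if ch ∈ path then [] else
              pvBackA K T fuel (path ++ [ch]) (PySem.Set.ofList (path ++ [ch]))
                ((path.length : Int) + 1))) := by
        funext acc ch
        have hc : PySem.Set.contains (PySem.Set.ofList path) ch = decide (ch ∈ path) := by
          simp [PySem.Set.contains, PySem.Set.mem_ofList]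
        rw [hc]
        by_cases hmem : ch ∈ path
        · simp [hmem]
        · simp [hmem, pvOfList_append_singleton]
      rw [hfun, PySem.List.foldl_append_eq_flatMap, List.nil_append]
      rw [hm]
      simp only [pvE, pvProdFrom]
      rw [List.flatMap_assoc]
      simp only [pvPool]
      apply List.flatMap_congr
      intro ch hch
      have hcha : ch ∈ pvAlpha := by
        by_cases hT : (path.length : Int) < T
        · rw [if_pos hT] at hch
          exact List.mem_append_left _ hch
        · rw [if_neg hT] at hch
          exact hch
      rw [List.flatMap_map]
      rw [pvE_cons]
      by_cases hmem : ch ∈ path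
      · rw [if_pos hmem]
        have hnn : ¬ (path ++ [ch]).Nodup :=
          fun h => (List.disjoint_of_nodup_append h) hmem (List.mem_singleton_self ch)
        rw [pvE_of_not_nodup T _ _ _ hnn]
      · rw [if_neg hmem]
        have hnd' : (path ++ [ch]).Nodup :=
          hnd.append (List.nodup_singleton ch)
            (fun a ha hb => hmem (List.mem_singleton.mp hb ▸ ha))
        have hsub' : ∀ c ∈ path ++ [ch], c ∈ pvAlpha := by
          intro c hc
          rcases List.mem_append.mp hc with h | h
          · exact hsub c h
          · rw [List.mem_singleton.mp h]; exact hcha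
        have hlen' : ((path ++ [ch]).length : Int) = (path.length : Int) + 1 := by
          rw [List.length_append, List.length_singleton]
          push_cast
          ring
        have hih := ih (path ++ [ch]) (by simp [List.length_append] at *; omega) hnd' hsub' hK
          (by rw [hlen']; omega)
        rw [hlen'] at hih
        exact hih

theorem pvCondB_eq_ok (K : Int) (t : List Char) (hlen : (t.length : Int) = K) :
    pvCondB K t = pvOk t := by
  unfold pvCondB pvOk
  have h1 : (((PySem.Set.ofList t).length : Int) == K) = decide t.Nodup := by
    by_cases hn : t.Nodup
    · rw [(pvOfList_length_eq_iff t).mpr hn, hlen]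
      simp [hn]
    · have hne : (PySem.Set.ofList t).length ≠ t.length :=
        fun h => hn ((pvOfList_length_eq_iff t).mp h)
      have hne' : ((PySem.Set.ofList t).length : Int) ≠ K := by
        rw [← hlen]
        exact_mod_cast hne
      simp [hn, hne']
  rw [h1]

-- ===== VERDICT (by name: the statement is the Claim_ definition above) =====
theorem generate_optimized_passwords_spec : Claim_equal_generate_optimized_passwords := by
  intro K T _ hpre
  unfold Spec_generate_optimized_passwords generate_optimized_passwords generate_optimized_passwords_alt
  have hA := pvBackA_eq K T 63 [] (by simp) (by simp) (by simp) hpre (by simpa using hpre)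
  simp only [List.length_nil, Nat.cast_zero, Int.sub_zero] at hA
  have hempty : (PySem.Set.empty : PySem.Set Char) = PySem.Set.ofList [] := rfl
  rw [hempty, hA]
  have hKc : ((K.toNat : Nat) : Int) = K := Int.toNat_of_nonneg hpre
  have hrange : PySem.List.pyRange 0 K 1 = PySem.List.pyRange 0 (0 + (K.toNat : Int)) 1 := by
    rw [zero_add, hKc]
  rw [hrange, pvProduct_pools T K.toNat 0]
  have hfB : (fun (acc : List String) t => if pvCondB K t then acc ++ [String.ofList t] else acc)
      = (fun acc t => acc ++ (if pvCondB K t then [String.ofList t] else [])) := by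
    funext acc t
    split <;> simp
  rw [hfB, PySem.List.foldl_append_eq_flatMap, List.nil_append]
  unfold pvE
  apply List.flatMap_congr
  intro t ht
  have hlen : (t.length : Int) = K := by
    rw [pvProdFrom_length T K.toNat 0 t ht, hKc]
  rw [List.nil_append, pvCondB_eq_ok K t hlen]
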